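-- pv_equiv track=rewrite | github.com/patrickchugh/terravision | modules/resource_handlers_aws.py | link_ec2_to_iam_roles
-- ===== SOURCE A (Python) =====
-- from typing import Dict, List, Any
--
-- def link_ec2_to_iam_roles(terraform_data: Dict[str, List[str]]) -> Dict[str, List[str]]:
--     """Link EC2 instances to IAM roles via instance profiles.
--
--     Args:
--         terraform_data: Resource graph dictionary
--
--     Returns:
--         Updated graph with EC2-IAM links
--     """
--     result = dict(terraform_data)
--
--     # Map instance profiles to IAM roles
--     profile_to_role = {}
--     for resource, deps in sorted(terraform_data.items()):
--         if "aws_iam_role" in resource: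
--             for dep in deps:
--                 if "aws_iam_instance_profile" in dep:
--                     profile_to_role[dep] = resource
--
--     # Find instance profiles that connect to EC2 instances and add EC2 to IAM role deps
--     for resource, deps in sorted(terraform_data.items()):
--         if "aws_iam_instance_profile" in resource and resource in profile_to_role:
--             iam_role = profile_to_role[resource]
--             for dep in deps:
--                 if "aws_instance" in dep and dep not in result[iam_role]:
--                     result[iam_role].append(dep)
--
--     return result
-- ===== SOURCE B (Python) =====
-- def link_ec2_to_iam_roles(terraform_data):
--     """Link EC2 instances to IAM roles via instance profiles.
--
--     Functional rewrite: no profile->role dict is built and nothing is mutated.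
--     For every profile the owning role is resolved directly as the last role (in
--     sorted key order) whose deps mention it -- the same role that would win the
--     overwrite in an index-building pass -- and the output dict is rebuilt
--     key by key, extending role entries with their deduplicated EC2 candidates.
--     """
--     items = sorted(terraform_data.items())
--
--     def owner(profile):
--         owners = [r for r, rdeps in items
--                   if "aws_iam_role" in r and profile in rdeps]
--         return owners[-1] if owners else None
--
--     out = {}
--     for key, deps in terraform_data.items():
--         new = list(deps)
--         if "aws_iam_role" in key:
--             for p, pdeps in items:
--                 if "aws_iam_instance_profile" in p and owner(p) == key:
--                     for d in pdeps:
--                         if "aws_instance" in d and d not in new: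
--                             new.append(d)
--         out[key] = new
--     return out
-- ===== Notes on version B (the rewrite author's own statement) =====
-- stated objective: alternative
-- what changed: B builds no profile-to-role index and mutates nothing: for each profile it resolves the owning role directly as the last role in sorted key order whose deps mention that profile, and rebuilds the output dict key by key, extending each role entry with its deduplicated EC2 candidates. …
import Mathlib
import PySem

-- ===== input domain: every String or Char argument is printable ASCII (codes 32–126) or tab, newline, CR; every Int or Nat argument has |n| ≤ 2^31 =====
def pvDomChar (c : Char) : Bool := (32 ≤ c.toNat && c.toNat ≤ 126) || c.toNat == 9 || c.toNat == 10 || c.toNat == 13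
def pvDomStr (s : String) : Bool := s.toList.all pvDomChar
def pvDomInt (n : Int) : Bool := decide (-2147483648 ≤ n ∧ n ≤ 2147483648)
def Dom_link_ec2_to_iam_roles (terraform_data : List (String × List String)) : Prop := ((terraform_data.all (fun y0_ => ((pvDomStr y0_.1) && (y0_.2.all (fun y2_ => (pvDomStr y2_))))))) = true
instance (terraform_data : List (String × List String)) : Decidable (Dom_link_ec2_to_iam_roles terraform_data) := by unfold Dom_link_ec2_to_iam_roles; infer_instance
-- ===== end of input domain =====

-- B builds no profile-to-role index and mutates nothing: each profile's owning role is
-- resolved directly as the last role in sorted key order whose deps mention it, and the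
-- output dict is rebuilt key by key (alternative decomposition); the equivalence is about
-- the RETURN value only — the Python A also mutates the input's dep lists in place, B does not.

def pvHasRole (s : String) : Bool := PySem.Str.isIn "aws_iam_role" s
def pvHasProf (s : String) : Bool := PySem.Str.isIn "aws_iam_instance_profile" s
def pvHasEc2 (s : String) : Bool := PySem.Str.isIn "aws_instance" s

-- ===== PORT A =====
def link_ec2_to_iam_roles (terraform_data : List (String × List String)) : List (String × List String) :=
  let td : PySem.Dict String (List String) := PySem.Dict.ofList terraform_data
  -- sorted(terraform_data.items()): tuples compare by first component first and the dict's
  -- keys are unique, so sorting by the key alone is exact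
  let items := PySem.List.sorted td.items (fun p => p.1) false
  let profile_to_role : PySem.Dict String String :=
    items.foldl (fun m p =>
      if pvHasRole p.1 then
        p.2.foldl (fun m dep => if pvHasProf dep then m.insert dep p.1 else m) m
      else m) PySem.Dict.empty
  let result : PySem.Dict String (List String) :=
    items.foldl (fun res p =>
      if pvHasProf p.1 && profile_to_role.contains p.1 then
        match profile_to_role.get? p.1 with
        | some iam_role =>
          -- Python iterates the live aliased list result[p.1]; reading it at inner-loop
          -- entry is exact: an element appended during the inner loop is already a member
          -- of result[iam_role], so iterating over it can never append again
          (res.getD p.1 []).foldl (fun res dep =>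
            if pvHasEc2 dep && !((res.getD iam_role []).contains dep) then
              res.modify iam_role [] (fun l => l ++ [dep])
            else res) res
        | none => res
      else res) td
  result.items

-- ===== PORT B =====
-- owner(profile): the last role (sorted key order) whose deps mention the profile
def pvOwner (items : List (String × List String)) (profile : String) : Option String :=
  let owners := (items.filter (fun q => pvHasRole q.1 && q.2.contains profile)).map Prod.fst
  if owners.isEmpty then none else PySem.List.pyGet? owners (-1)

def link_ec2_to_iam_roles_alt (terraform_data : List (String × List String)) : List (String × List String) :=
  let td : PySem.Dict String (List String) := PySem.Dict.ofList terraform_data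
  let items := PySem.List.sorted td.items (fun p => p.1) false
  let out : PySem.Dict String (List String) :=
    td.items.foldl (fun out q =>
      let new :=
        if pvHasRole q.1 then
          items.foldl (fun acc p =>
            if pvHasProf p.1 && (pvOwner items p.1 == some q.1) then
              p.2.foldl (fun acc d =>
                if pvHasEc2 d && !acc.contains d then acc ++ [d] else acc) acc
            else acc) q.2
        else q.2
      out.insert q.1 new) PySem.Dict.empty
  out.items

-- ===== PRECONDITION & SPEC =====
-- Pre_ excludes inputs where some resource key contains both "aws_iam_instance_profile" and
-- "aws_iam_role" as substrings: there the result depends on list aliasing between the shallow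
-- copy and the input (the second loop re-reads dep lists extended earlier in the same loop),
-- a corner no caller specifies and on which A's and B's values are both defensible.
def Pre_link_ec2_to_iam_roles (terraform_data : List (String × List String)) : Prop :=
  (terraform_data.all (fun p => !(pvHasProf p.1 && pvHasRole p.1))) = true
instance (terraform_data : List (String × List String)) : Decidable (Pre_link_ec2_to_iam_roles terraform_data) := by unfold Pre_link_ec2_to_iam_roles; infer_instance

def pvWitness_link_ec2_to_iam_roles : (List (String × List String)) :=
  [("aws_iam_role.r", ["aws_iam_instance_profile.p"]),
   ("aws_iam_instance_profile.p", ["aws_instance.i", "aws_s3_bucket.b"])]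

def Spec_link_ec2_to_iam_roles (terraform_data : List (String × List String)) (out : List (String × List String)) : Prop := out = link_ec2_to_iam_roles_alt terraform_data
instance (terraform_data : List (String × List String)) (out : List (String × List String)) : Decidable (Spec_link_ec2_to_iam_roles terraform_data out) := by unfold Spec_link_ec2_to_iam_roles; infer_instance

-- ===== CLAIM (what is proved, stated in full; the proofs are below) =====
def Claim_equal_link_ec2_to_iam_roles : Prop := ∀ (terraform_data : List (String × List String)), Dom_link_ec2_to_iam_roles terraform_data → Pre_link_ec2_to_iam_roles terraform_data → Spec_link_ec2_to_iam_roles terraform_data (link_ec2_to_iam_roles terraform_data)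

-- ===== LEMMAS AND PROOFS =====

-- proof-side mirrors of the folds
def pvJ (cs l : List String) : List String :=
  cs.foldl (fun l c => if l.contains c then l else l ++ [c]) l

def pvInner (r : String) (res : PySem.Dict String (List String)) (deps : List String) :
    PySem.Dict String (List String) :=
  deps.foldl (fun res dep =>
    if pvHasEc2 dep && !((res.getD r []).contains dep) then
      res.modify r [] (fun l => l ++ [dep])
    else res) res

def pvStepA (m2 : PySem.Dict String String) (res : PySem.Dict String (List String))
    (p : String × List String) : PySem.Dict String (List String) :=
  if pvHasProf p.1 && m2.contains p.1 then
    match m2.get? p.1 with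
    | some r => pvInner r res (res.getD p.1 [])
    | none => res
  else res

-- the EC2 candidates that the entries ps contribute to role k
def pvCollect (m2 : PySem.Dict String String) (ps : List (String × List String)) (k : String) :
    List String :=
  match ps with
  | [] => []
  | p :: ps =>
      (if pvHasProf p.1 = true ∧ m2.get? p.1 = some k then p.2.filter pvHasEc2 else [])
        ++ pvCollect m2 ps k

-- the last role entry (in list order) whose deps mention p — B's owner, A's overwrite winner
def pvLastOwner : List (String × List String) → String → Option String
  | [], _ => none
  | q :: qs, p => (pvLastOwner qs p).or (if pvHasRole q.1 && q.2.contains p then some q.1 else none)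

theorem pvJ_append (a b l : List String) : pvJ (a ++ b) l = pvJ b (pvJ a l) := by
  simp [pvJ, List.foldl_append]

theorem pv_dedup_filter (deps l : List String) :
    deps.foldl (fun l d => if pvHasEc2 d && !(l.contains d) then l ++ [d] else l) l
      = pvJ (deps.filter pvHasEc2) l := by
  have hfun : (fun (l : List String) d => if pvHasEc2 d && !(l.contains d) then l ++ [d] else l)
      = (fun (l : List String) d => if pvHasEc2 d then (if l.contains d then l else l ++ [d]) else l) := by
    funext l d
    cases h1 : pvHasEc2 d <;> cases h2 : l.contains d <;> simp
  rw [hfun, pvJ, PySem.List.foldl_if_eq_foldl_filter]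

theorem pvInner_getD_self (r : String) (res : PySem.Dict String (List String)) (deps : List String) :
    (pvInner r res deps).getD r []
      = deps.foldl (fun l d => if pvHasEc2 d && !(l.contains d) then l ++ [d] else l) (res.getD r []) := by
  induction deps generalizing res with
  | nil => rfl
  | cons d ds ih =>
    simp only [pvInner, List.foldl_cons] at *
    by_cases h : (pvHasEc2 d && !((res.getD r []).contains d)) = true
    · rw [if_pos h, if_pos h, ih]
      congr 1
      rw [PySem.Dict.getD_modify]
      simp
    · rw [if_neg h, if_neg h, ih]

theorem pvInner_getD_ne (r : String) (res : PySem.Dict String (List String)) (deps : List String)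
    (k : String) (h : k ≠ r) : (pvInner r res deps).getD k [] = res.getD k [] := by
  induction deps generalizing res with
  | nil => rfl
  | cons d ds ih =>
    simp only [pvInner, List.foldl_cons] at *
    by_cases hc : (pvHasEc2 d && !((res.getD r []).contains d)) = true
    · rw [if_pos hc, ih, PySem.Dict.getD_modify, if_neg h]
    · rw [if_neg hc, ih]

theorem pvInner_keys (r : String) (res : PySem.Dict String (List String)) (deps : List String)
    (h : res.contains r = true) : (pvInner r res deps).keys = res.keys := by
  induction deps generalizing res with
  | nil => rfl
  | cons d ds ih =>
    simp only [pvInner, List.foldl_cons] at *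
    by_cases hc : (pvHasEc2 d && !((res.getD r []).contains d)) = true
    · rw [if_pos hc, ih]
      · rw [PySem.Dict.keys_modify, PySem.Dict.keys_insert_of_contains _ _ h]
      · rw [PySem.Dict.contains_modify]
        simp [h]
    · rw [if_neg hc]; exact ih res h

-- the profile_to_role construction only maps to role-named keys of the dict
def pvStepP2R (m : PySem.Dict String String) (p : String × List String) :
    PySem.Dict String String :=
  if pvHasRole p.1 then
    p.2.foldl (fun m dep => if pvHasProf dep then m.insert dep p.1 else m) m
  else m

theorem pv_p2r_inner_prop (td0 : PySem.Dict String (List String)) (x : String)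
    (hx : pvHasRole x = true ∧ x ∈ td0.keys) (deps : List String)
    (m : PySem.Dict String String)
    (hm : ∀ p r, m.get? p = some r → pvHasRole r = true ∧ r ∈ td0.keys) :
    ∀ p r, ((deps.foldl (fun m dep => if pvHasProf dep then m.insert dep x else m) m).get? p = some r)
      → pvHasRole r = true ∧ r ∈ td0.keys := by
  induction deps generalizing m with
  | nil => exact hm
  | cons d ds ih =>
    simp only [List.foldl_cons]
    by_cases hd : pvHasProf d = true
    · rw [if_pos hd]
      refine ih _ ?_
      intro p r hp
      rw [PySem.Dict.get?_insert] at hp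
      by_cases hpd : p = d
      · rw [if_pos hpd] at hp
        cases hp
        exact hx
      · rw [if_neg hpd] at hp
        exact hm p r hp
    · rw [if_neg hd]; exact ih m hm

theorem pv_p2r_prop (td0 : PySem.Dict String (List String)) (ps : List (String × List String))
    (hps : ∀ p ∈ ps, p.1 ∈ td0.keys) (m : PySem.Dict String String)
    (hm : ∀ p r, m.get? p = some r → pvHasRole r = true ∧ r ∈ td0.keys) :
    ∀ p r, ((ps.foldl pvStepP2R m).get? p = some r) → pvHasRole r = true ∧ r ∈ td0.keys := by
  induction ps generalizing m with
  | nil => exact hm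
  | cons q qs ih =>
    simp only [List.foldl_cons]
    refine ih (fun p hp => hps p (List.mem_cons_of_mem _ hp)) _ ?_
    unfold pvStepP2R
    by_cases hq : pvHasRole q.1 = true
    · rw [if_pos hq]
      exact pv_p2r_inner_prop td0 q.1 ⟨hq, hps q (List.mem_cons_self ..)⟩ q.2 m hm
    · rw [if_neg hq]; exact hm

theorem pv_foldA_main (m2 : PySem.Dict String String) (td0 : PySem.Dict String (List String))
    (hrole : ∀ p r, m2.get? p = some r → pvHasRole r = true ∧ r ∈ td0.keys)
    (ps : List (String × List String))
    (hdeps : ∀ p ∈ ps, td0.getD p.1 [] = p.2 ∧ (pvHasProf p.1 = true → pvHasRole p.1 = false))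
    (res : PySem.Dict String (List String))
    (hkeys : res.keys = td0.keys)
    (hinv : ∀ q, pvHasRole q = false → res.getD q [] = td0.getD q []) :
    (ps.foldl (pvStepA m2) res).keys = td0.keys ∧
      ∀ k, (ps.foldl (pvStepA m2) res).getD k [] = pvJ (pvCollect m2 ps k) (res.getD k []) := by
  induction ps generalizing res with
  | nil => exact ⟨hkeys, fun k => rfl⟩
  | cons p ps ih =>
    simp only [List.foldl_cons]
    by_cases hg : (pvHasProf p.1 && m2.contains p.1) = true
    · obtain ⟨hprof, hcont⟩ := (Bool.and_eq_true _ _).mp hg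
      cases hr : m2.get? p.1 with
      | none =>
        rw [PySem.Dict.contains_eq_isSome_get?, hr] at hcont
        simp at hcont
      | some r =>
        have hstep : pvStepA m2 res p = pvInner r res (res.getD p.1 []) := by
          unfold pvStepA
          rw [if_pos hg, hr]
        obtain ⟨hrr, hrk⟩ := hrole p.1 r hr
        have hnotrole : pvHasRole p.1 = false := (hdeps p (List.mem_cons_self ..)).2 hprof
        have hres_p : res.getD p.1 [] = p.2 := by
          rw [hinv p.1 hnotrole, (hdeps p (List.mem_cons_self ..)).1]
        have hcontr : res.contains r = true := by
          rw [PySem.Dict.contains_iff_mem_keys, hkeys]; exact hrk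
        have hkeys1 : (pvInner r res (res.getD p.1 [])).keys = td0.keys := by
          rw [pvInner_keys r res _ hcontr, hkeys]
        have hinv1 : ∀ q, pvHasRole q = false →
            (pvInner r res (res.getD p.1 [])).getD q [] = td0.getD q [] := by
          intro q hq
          have hqr : q ≠ r := by intro h; rw [h, hrr] at hq; cases hq
          rw [pvInner_getD_ne r res _ q hqr]
          exact hinv q hq
        obtain ⟨ihk, ihg⟩ := ih (fun q hq => hdeps q (List.mem_cons_of_mem _ hq)) _ hkeys1 hinv1
        rw [hstep] at *
        refine ⟨ihk, ?_⟩
        intro k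
        rw [ihg k]
        by_cases hkr : k = r
        · subst hkr
          rw [pvInner_getD_self, pv_dedup_filter, hres_p]
          have hcond : pvHasProf p.1 = true ∧ m2.get? p.1 = some k := ⟨hprof, hr⟩
          show pvJ (pvCollect m2 ps k) _ = pvJ ((if pvHasProf p.1 = true ∧ m2.get? p.1 = some k then p.2.filter pvHasEc2 else []) ++ pvCollect m2 ps k) (res.getD k [])
          rw [if_pos hcond, pvJ_append]
        · rw [pvInner_getD_ne r res _ k hkr]
          have hcond : ¬ (pvHasProf p.1 = true ∧ m2.get? p.1 = some k) := by
            rintro ⟨-, h2⟩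
            rw [hr] at h2
            cases h2
            exact hkr rfl
          show pvJ (pvCollect m2 ps k) _ = pvJ ((if pvHasProf p.1 = true ∧ m2.get? p.1 = some k then p.2.filter pvHasEc2 else []) ++ pvCollect m2 ps k) (res.getD k [])
          rw [if_neg hcond, List.nil_append]
    · have hstep : pvStepA m2 res p = res := by unfold pvStepA; rw [if_neg hg]
      rw [hstep]
      obtain ⟨ihk, ihg⟩ := ih (fun q hq => hdeps q (List.mem_cons_of_mem _ hq)) res hkeys hinv
      refine ⟨ihk, ?_⟩
      intro k
      rw [ihg k]
      have hcond : ¬ (pvHasProf p.1 = true ∧ m2.get? p.1 = some k) := by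
        rintro ⟨h1, h2⟩
        apply hg
        rw [h1, PySem.Dict.contains_eq_isSome_get?, h2]
        rfl
      show pvJ (pvCollect m2 ps k) _ = pvJ ((if pvHasProf p.1 = true ∧ m2.get? p.1 = some k then p.2.filter pvHasEc2 else []) ++ pvCollect m2 ps k) (res.getD k [])
      rw [if_neg hcond, List.nil_append]

-- ===== B-side lemmas =====

theorem pv_getLast?_cons_or {α : Type} (a : α) (l : List α) :
    (a :: l).getLast? = l.getLast?.or (some a) := by
  induction l with
  | nil => rfl
  | cons b bs _ =>
    rw [List.getLast?_cons_cons]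
    cases h : (b :: bs).getLast? with
    | none => simp [List.getLast?_eq_none_iff] at h
    | some x => rfl

theorem pvOwner_eq_lastOwner (items : List (String × List String)) (p : String) :
    pvOwner items p = pvLastOwner items p := by
  have hlast : ∀ (l : List (String × List String)),
      ((l.filter (fun q => pvHasRole q.1 && q.2.contains p)).map Prod.fst).getLast?
        = pvLastOwner l p := by
    intro l
    induction l with
    | nil => rfl
    | cons q qs ih =>
      rw [List.filter_cons]
      by_cases hq : (pvHasRole q.1 && q.2.contains p) = true
      · rw [if_pos hq, List.map_cons, pv_getLast?_cons_or, ih,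
          show pvLastOwner (q :: qs) p
              = (pvLastOwner qs p).or
                  (if pvHasRole q.1 && q.2.contains p then some q.1 else none) from rfl,
          if_pos hq]
      · rw [if_neg hq, ih,
          show pvLastOwner (q :: qs) p
              = (pvLastOwner qs p).or
                  (if pvHasRole q.1 && q.2.contains p then some q.1 else none) from rfl,
          if_neg hq, Option.or_none]
  unfold pvOwner
  cases h : ((items.filter (fun q => pvHasRole q.1 && q.2.contains p)).map Prod.fst) with
  | nil => rw [← hlast, h]; rfl
  | cons x xs =>
    have hne : (x :: xs).isEmpty = false := rfl
    simp only [hne, Bool.false_eq_true, if_false, PySem.List.pyGet?_neg_one]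
    rw [← hlast, h]

theorem pv_p2r_inner_get (x : String) (deps : List String) (m : PySem.Dict String String)
    (p : String) (hp : pvHasProf p = true) :
    ((deps.foldl (fun m dep => if pvHasProf dep then m.insert dep x else m) m).get? p)
      = if deps.contains p then some x else m.get? p := by
  induction deps generalizing m with
  | nil => rfl
  | cons d ds ih =>
    simp only [List.foldl_cons]
    rw [ih]
    by_cases hds : ds.contains p = true
    · have hc : (d :: ds).contains p = true := by
        rw [List.contains_cons, hds, Bool.or_true]
      rw [if_pos hds, if_pos hc]
    · by_cases hdp : d = p
      · have hc : (d :: ds).contains p = true := by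
          rw [List.contains_cons, show (p == d) = true from beq_iff_eq.mpr hdp.symm,
            Bool.true_or]
        rw [if_neg hds, if_pos hc, hdp, if_pos hp, PySem.Dict.get?_insert_self]
      · have hdp' : (p == d) = false := by
          rw [beq_eq_false_iff_ne]; intro h; exact hdp h.symm
        have hc : (d :: ds).contains p = ds.contains p := by
          rw [List.contains_cons, hdp', Bool.false_or]
        rw [if_neg hds, hc, if_neg hds]
        by_cases hd : pvHasProf d = true
        · rw [if_pos hd, PySem.Dict.get?_insert_of_ne _ _ (fun h => hdp h.symm)]
        · rw [if_neg hd]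

theorem pv_p2r_get (ps : List (String × List String)) (m : PySem.Dict String String)
    (p : String) (hp : pvHasProf p = true) :
    (ps.foldl pvStepP2R m).get? p = (pvLastOwner ps p).or (m.get? p) := by
  induction ps generalizing m with
  | nil => rfl
  | cons q qs ih =>
    simp only [List.foldl_cons]
    rw [ih]
    have hstep : (pvStepP2R m q).get? p
        = (if pvHasRole q.1 && q.2.contains p then some q.1 else none).or (m.get? p) := by
      unfold pvStepP2R
      by_cases hq : pvHasRole q.1 = true
      · rw [if_pos hq, pv_p2r_inner_get _ _ _ _ hp,
          show (pvHasRole q.1 && q.2.contains p) = q.2.contains p from by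
            rw [hq, Bool.true_and]]
        by_cases hc : q.2.contains p = true
        · rw [if_pos hc, if_pos hc]; rfl
        · rw [if_neg hc, if_neg hc]; rfl
      · rw [if_neg hq,
          show (pvHasRole q.1 && q.2.contains p) = false from by
            rw [Bool.not_eq_true] at hq; rw [hq, Bool.false_and],
          if_neg Bool.false_ne_true]
        rfl
    rw [hstep, ← Option.or_assoc]
    rfl

theorem pv_collect_nil (m2 : PySem.Dict String String) (ps : List (String × List String))
    (k : String) (h : ∀ p, m2.get? p = some k → False) : pvCollect m2 ps k = [] := by
  induction ps with
  | nil => rfl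
  | cons q qs ih =>
    unfold pvCollect
    rw [if_neg (by rintro ⟨-, h2⟩; exact h q.1 h2), List.nil_append, ih]

theorem pv_foldB (m2 : PySem.Dict String String) (items0 : List (String × List String))
    (howner : ∀ p, pvHasProf p = true → pvOwner items0 p = m2.get? p)
    (ps : List (String × List String)) (k : String) (acc : List String) :
    ps.foldl (fun acc p =>
        if pvHasProf p.1 && (pvOwner items0 p.1 == some k) then
          p.2.foldl (fun acc d =>
            if pvHasEc2 d && !acc.contains d then acc ++ [d] else acc) acc
        else acc) acc
      = pvJ (pvCollect m2 ps k) acc := by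
  induction ps generalizing acc with
  | nil => rfl
  | cons p ps ih =>
    simp only [List.foldl_cons]
    have hcoll : pvCollect m2 (p :: ps) k
        = (if pvHasProf p.1 = true ∧ m2.get? p.1 = some k then p.2.filter pvHasEc2 else [])
            ++ pvCollect m2 ps k := rfl
    by_cases hprof : pvHasProf p.1 = true
    · rw [howner p.1 hprof] at *
      by_cases hk : m2.get? p.1 = some k
      · have hcond : (pvHasProf p.1 && (m2.get? p.1 == some k)) = true := by simp [hprof, hk]
        rw [if_pos hcond, pv_dedup_filter, ih, hcoll, if_pos ⟨hprof, hk⟩, pvJ_append]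
      · have hcond : ¬ ((pvHasProf p.1 && (m2.get? p.1 == some k)) = true) := by simp [hk]
        rw [if_neg hcond, ih, hcoll, if_neg (by rintro ⟨-, h2⟩; exact hk h2), List.nil_append]
    · have hcond : ¬ ((pvHasProf p.1 && (pvOwner items0 p.1 == some k)) = true) := by
        simp [hprof]
      rw [if_neg hcond, ih, hcoll, if_neg (by rintro ⟨h1, -⟩; exact hprof h1), List.nil_append]

theorem pv_mem_keys_ofList (ps : List (String × List String)) (k : String) :
    k ∈ (PySem.Dict.ofList ps).keys ↔ k ∈ ps.map Prod.fst := by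
  show k ∈ (ps.foldl (fun acc p => acc.insert p.1 p.2) PySem.Dict.empty).keys ↔ _
  rw [PySem.Dict.keys_foldl_insert_key ps (fun p => p.1) (fun _ x => x.2) PySem.Dict.empty]
  rw [PySem.Dict.keys_empty, PySem.Set.update_nil_left, PySem.Set.mem_ofList]

-- proof-side names for the pieces of the two ports
def pvTd (l : List (String × List String)) : PySem.Dict String (List String) :=
  PySem.Dict.ofList l

def pvItems (l : List (String × List String)) : List (String × List String) :=
  PySem.List.sorted (pvTd l).items (fun p => p.1) false

def pvP2R (l : List (String × List String)) : PySem.Dict String String :=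
  (pvItems l).foldl pvStepP2R PySem.Dict.empty

-- B's per-key value
def pvBVal (items0 : List (String × List String)) (q : String × List String) : List String :=
  if pvHasRole q.1 then
    items0.foldl (fun acc p =>
      if pvHasProf p.1 && (pvOwner items0 p.1 == some q.1) then
        p.2.foldl (fun acc d =>
          if pvHasEc2 d && !acc.contains d then acc ++ [d] else acc) acc
      else acc) q.2
  else q.2

theorem pv_portA_eq (l : List (String × List String)) :
    link_ec2_to_iam_roles l = ((pvItems l).foldl (pvStepA (pvP2R l)) (pvTd l)).items := rfl

theorem pv_portB_eq (l : List (String × List String)) :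
    link_ec2_to_iam_roles_alt l =
      ((pvTd l).items.foldl (fun out q => out.insert q.1 (pvBVal (pvItems l) q))
        PySem.Dict.empty).items := rfl

theorem pv_main (l : List (String × List String)) (hpre : Pre_link_ec2_to_iam_roles l) :
    link_ec2_to_iam_roles l = link_ec2_to_iam_roles_alt l := by
  rw [pv_portA_eq, pv_portB_eq]
  have hndk : (pvTd l).keys.Nodup := PySem.Dict.nodup_keys_ofList l
  have hpre' : ∀ k ∈ (pvTd l).keys, pvHasProf k = true → pvHasRole k = false := by
    intro k hk hprof
    rcases List.mem_map.mp ((pv_mem_keys_ofList l k).mp hk) with ⟨p, hp, hpk⟩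
    have := (List.all_eq_true.mp hpre) p hp
    rw [hpk] at this
    cases hrole : pvHasRole k
    · rfl
    · rw [hprof, hrole] at this; cases this
  have hmemtd : ∀ p ∈ pvItems l, p ∈ (pvTd l).items := by
    intro p hp
    exact (PySem.List.mem_sorted _ _ _ _).mp hp
  have hkeystd : ∀ p ∈ pvItems l, p.1 ∈ (pvTd l).keys := by
    intro p hp
    exact PySem.Dict.mem_keys_of_mem_items _ (hmemtd p hp)
  have hrole : ∀ p r, (pvP2R l).get? p = some r → pvHasRole r = true ∧ r ∈ (pvTd l).keys := by
    refine pv_p2r_prop (pvTd l) (pvItems l) hkeystd PySem.Dict.empty ?_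
    intro p r h
    rw [PySem.Dict.get?_empty] at h
    cases h
  have hdeps : ∀ p ∈ pvItems l,
      (pvTd l).getD p.1 [] = p.2 ∧ (pvHasProf p.1 = true → pvHasRole p.1 = false) := by
    intro p hp
    refine ⟨?_, hpre' p.1 (hkeystd p hp)⟩
    have : (p.1, p.2) ∈ (pvTd l).items := by
      have := hmemtd p hp
      rwa [show ((p.1, p.2) : String × List String) = p from rfl]
    exact PySem.Dict.getD_of_mem_items _ this hndk []
  obtain ⟨hAkeys, hAgetD⟩ :=
    pv_foldA_main (pvP2R l) (pvTd l) hrole (pvItems l) hdeps (pvTd l) rfl (fun q _ => rfl)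
  -- owner(p) = profile_to_role.get? p for profile-named p
  have howner : ∀ p, pvHasProf p = true → pvOwner (pvItems l) p = (pvP2R l).get? p := by
    intro p hp
    rw [pvOwner_eq_lastOwner, pvP2R, pv_p2r_get _ _ _ hp, PySem.Dict.get?_empty,
      Option.or_none]
  -- B's dict: fresh distinct keys from empty
  have hBitems : ((pvTd l).items.foldl (fun out q => out.insert q.1 (pvBVal (pvItems l) q))
        PySem.Dict.empty).items
      = (pvTd l).items.map (fun q => (q.1, pvBVal (pvItems l) q)) := by
    have := PySem.Dict.items_foldl_insert_fresh (d := (PySem.Dict.empty : PySem.Dict String (List String)))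
      (l := (pvTd l).items) (k := Prod.fst) (v := fun q => pvBVal (pvItems l) q)
      (fun a _ => PySem.Dict.contains_empty (ν := List String) a) hndk
    simpa using this
  -- A's dict as a map over keys
  set SA := (pvItems l).foldl (pvStepA (pvP2R l)) (pvTd l) with hSA
  have hSAnd : SA.keys.Nodup := by rw [hAkeys]; exact hndk
  rw [PySem.Dict.items_eq_map_keys SA hSAnd ([] : List String), hAkeys, hBitems,
    PySem.Dict.items_eq_map_keys (pvTd l) hndk ([] : List String), List.map_map]
  refine List.map_congr_left ?_
  intro k hk
  show (k, SA.getD k []) = (k, pvBVal (pvItems l) (k, (pvTd l).getD k []))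
  have hval : pvBVal (pvItems l) (k, (pvTd l).getD k [])
      = pvJ (pvCollect (pvP2R l) (pvItems l) k) ((pvTd l).getD k []) := by
    unfold pvBVal
    by_cases hkr : pvHasRole k = true
    · simp only [hkr, if_pos]
      exact pv_foldB (pvP2R l) (pvItems l) howner (pvItems l) k _
    · simp only [hkr, Bool.false_eq_true, if_false]
      rw [pv_collect_nil (pvP2R l) (pvItems l) k
        (fun p hpk => hkr (hrole p k hpk).1)]
      rfl
  rw [hval, hAgetD k]

-- ===== VERDICT (by name: the statement is the Claim_ definition above) =====
theorem link_ec2_to_iam_roles_spec : Claim_equal_link_ec2_to_iam_roles := by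
  intro terraform_data _ hpre
  show link_ec2_to_iam_roles terraform_data = link_ec2_to_iam_roles_alt terraform_data
  exact pv_main terraform_data hpre
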